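-- pv_equiv track=rewrite | github.com/eliasubz/ML_Techniques | src/IBL.py | _vote_borda
-- ===== SOURCE A (Python) =====
-- def _vote_borda(labels_in_rank):
--     """
--     Borda count: closest gets k-1 points ... farthest 0.
--     Tie-break: class of the closest neighbor among tied totals.
--     """
--     k = len(labels_in_rank)
--     scores = {}
--     for r, cls in enumerate(labels_in_rank):  # r=0 is closest
--         scores[cls] = scores.get(cls, 0) + (k - 1 - r)
--     best = max(scores.values())
--     tied = [c for c, s in scores.items() if s == best]
--     if len(tied) == 1:
--         return tied[0]
--     # tie-break: pick the tied class that appears first (closest)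
--     for cls in labels_in_rank:
--         if cls in tied:
--             return cls
-- ===== SOURCE B (Python) =====
-- def _vote_borda(labels_in_rank):
--     """Borda count winner, dict-free: score each candidate by a direct sum
--     and take the first label with maximal score (max keeps the earliest,
--     i.e. closest, on ties)."""
--     k = len(labels_in_rank)
--
--     def score(c):
--         return sum(k - 1 - r for r, x in enumerate(labels_in_rank) if x == c)
--
--     return max(labels_in_rank, key=score)
-- ===== Notes on version B (the rewrite author's own statement) =====
-- stated objective: simpler
-- what changed: B drops A's score dictionary, tie list and tie-break rescan entirely: it computes each label's Borda score by a direct sum and returns max(labels_in_rank, key=score), whose first-maximal rule is exactly A's closest-neighbor tie-break.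
import Mathlib
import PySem

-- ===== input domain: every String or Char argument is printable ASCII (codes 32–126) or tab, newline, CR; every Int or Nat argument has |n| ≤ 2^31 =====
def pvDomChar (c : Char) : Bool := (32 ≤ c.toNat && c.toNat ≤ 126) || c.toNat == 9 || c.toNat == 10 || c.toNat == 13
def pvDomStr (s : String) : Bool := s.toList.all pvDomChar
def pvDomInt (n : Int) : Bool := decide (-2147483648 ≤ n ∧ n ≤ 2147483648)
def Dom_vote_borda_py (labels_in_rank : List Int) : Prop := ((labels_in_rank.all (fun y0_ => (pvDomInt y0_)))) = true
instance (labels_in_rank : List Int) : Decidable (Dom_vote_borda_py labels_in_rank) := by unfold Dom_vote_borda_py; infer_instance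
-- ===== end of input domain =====

-- B replaces A's score dict + tie list + tie-break rescan by one first-maximal argmax over the labels
-- with a per-class summed score (simpler decomposition, not faster).

-- ===== PORT A =====
def vote_borda_py (labels_in_rank : List Int) : Int :=
  let k : Int := labels_in_rank.length
  let scores : PySem.Dict Int Int :=
    (PySem.List.enumerate labels_in_rank).foldl
      (fun d rc => d.insert rc.2 (d.getD rc.2 0 + (k - 1 - rc.1)))
      (PySem.Dict.mk [])
  match PySem.List.max? scores.values id with
  | none => 0          -- Python's max raises ValueError here (empty input); excluded by Pre_
  | some best =>
    let tied := (scores.items.filter (fun p => p.2 == best)).map Prod.fst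
    if tied.length = 1 then tied.headD 0
    else
      match labels_in_rank.find? (fun c => tied.contains c) with
      | some c => c
      | none => 0      -- Python falls off the function (returns None); unreachable under Pre_

-- ===== PORT B =====
def pvScore (labels_in_rank : List Int) (c : Int) : Int :=
  (((PySem.List.enumerate labels_in_rank).filter (fun rx => rx.2 == c)).map
    (fun rx => (labels_in_rank.length : Int) - 1 - rx.1)).sum

def vote_borda_py_alt (labels_in_rank : List Int) : Int :=
  (PySem.List.max? labels_in_rank (pvScore labels_in_rank)).getD 0
  -- Python's max raises ValueError on []; excluded by Pre_

-- ===== PRECONDITION & SPEC =====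
-- Both Pythons raise ValueError (max() of an empty sequence) on the empty input; that is all Pre_ excludes.
def Pre_vote_borda_py (labels_in_rank : List Int) : Prop := labels_in_rank ≠ []
instance (labels_in_rank : List Int) : Decidable (Pre_vote_borda_py labels_in_rank) := by unfold Pre_vote_borda_py; infer_instance
def pvWitness_vote_borda_py : List Int := [2, 1, 2, 3]

def Spec_vote_borda_py (labels_in_rank : List Int) (out : Int) : Prop := out = vote_borda_py_alt labels_in_rank
instance (labels_in_rank : List Int) (out : Int) : Decidable (Spec_vote_borda_py labels_in_rank out) := by unfold Spec_vote_borda_py; infer_instance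

-- ===== CLAIM (what is proved, stated in full; the proofs are below) =====
def Claim_equal_vote_borda_py : Prop := ∀ (labels_in_rank : List Int), Dom_vote_borda_py labels_in_rank → Pre_vote_borda_py labels_in_rank → Spec_vote_borda_py labels_in_rank (vote_borda_py labels_in_rank)

-- ===== LEMMAS AND PROOFS =====

theorem pv_find?_congr_mem {α : Type} {p q : α → Bool} : ∀ (l : List α),
    (∀ x ∈ l, p x = q x) → l.find? p = l.find? q := by
  intro l h
  induction l with
  | nil => rfl
  | cons a t ih =>
    simp only [List.find?_cons]
    rw [h a (List.mem_cons_self)]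
    cases hq : q a with
    | true => rfl
    | false => exact ih (fun x hx => h x (List.mem_cons_of_mem _ hx))

theorem pv_max?_go (key : Int → Int) : ∀ (xs : List Int) (m : Int),
    List.foldl
      (fun acc x => match acc with
        | none => some x
        | some m => if key m < key x then some x else some m)
      (some m) xs
    = (m :: xs).find? (fun z => (m :: xs).all (fun y => decide (key y ≤ key z))) := by
  intro xs
  induction xs with
  | nil => intro m; simp
  | cons x t ih =>
    intro m
    simp only [List.foldl_cons]
    by_cases h : key m < key x
    · rw [if_pos h, ih x]
      have hm : ¬ ((fun z => (m :: x :: t).all (fun y => decide (key y ≤ key z))) m = true) := by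
        simp only [List.all_cons, decide_eq_true_eq, Bool.and_eq_true, not_and]
        intro _ hx; omega
      conv_rhs => rw [List.find?_cons_of_neg
        (p := fun z => (m :: x :: t).all (fun y => decide (key y ≤ key z))) hm]
      apply pv_find?_congr_mem
      intro z hz
      simp only [List.all_cons, decide_eq_true_eq]
      by_cases hx : key x ≤ key z
      · simp [hx, le_of_lt (lt_of_lt_of_le h hx)]
      · simp [hx]
    · rw [if_neg h, ih m]
      have h' : key x ≤ key m := by omega
      have hpm : ((m :: x :: t).all (fun y => decide (key y ≤ key m)))
               = ((m :: t).all (fun y => decide (key y ≤ key m))) := by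
        simp [List.all_cons, h']
      cases hQm : ((m :: t).all (fun y => decide (key y ≤ key m))) with
      | true =>
        conv_lhs => rw [List.find?_cons_of_pos
          (p := fun z => (m :: t).all (fun y => decide (key y ≤ key z))) hQm]
        conv_rhs => rw [List.find?_cons_of_pos
          (p := fun z => (m :: x :: t).all (fun y => decide (key y ≤ key z)))
          (by show ((m :: x :: t).all (fun y => decide (key y ≤ key m)) = true); rw [hpm]; exact hQm :
            ((fun z => (m :: x :: t).all (fun y => decide (key y ≤ key z))) m = true))]
      | false =>
        conv_lhs => rw [List.find?_cons_of_neg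
          (p := fun z => (m :: t).all (fun y => decide (key y ≤ key z)))
          (by simp [hQm] :
            ¬ ((fun z => (m :: t).all (fun y => decide (key y ≤ key z))) m = true))]
        conv_rhs => rw [List.find?_cons_of_neg
          (p := fun z => (m :: x :: t).all (fun y => decide (key y ≤ key z)))
          (by simp [hpm, hQm] :
            ¬ ((fun z => (m :: x :: t).all (fun y => decide (key y ≤ key z))) m = true))]
        have hpx : ((m :: x :: t).all (fun y => decide (key y ≤ key x))) = false := by
          by_contra hc
          rw [Bool.not_eq_false] at hc
          simp only [List.all_cons, decide_eq_true_eq, Bool.and_eq_true] at hc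
          obtain ⟨h1, h2, h3⟩ := hc
          have : ((m :: t).all (fun y => decide (key y ≤ key m))) = true := by
            simp only [List.all_cons, decide_eq_true_eq, Bool.and_eq_true]
            refine ⟨le_refl _, ?_⟩
            rw [List.all_eq_true] at h3 ⊢
            intro y hy
            have := h3 y hy
            simp only [decide_eq_true_eq] at this ⊢
            omega
          rw [hQm] at this; exact absurd this (by simp)
        conv_rhs => rw [List.find?_cons_of_neg
          (p := fun z => (m :: x :: t).all (fun y => decide (key y ≤ key z)))
          (by simp [hpx] :
            ¬ ((fun z => (m :: x :: t).all (fun y => decide (key y ≤ key z))) x = true))]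
        apply pv_find?_congr_mem
        intro z hz
        simp only [List.all_cons, decide_eq_true_eq]
        by_cases hmz : key m ≤ key z
        · simp [hmz, le_trans h' hmz]
        · simp [hmz]

theorem pv_max?_eq_find? (key : Int → Int) (xs : List Int) :
    PySem.List.max? xs key = xs.find? (fun z => xs.all (fun y => decide (key y ≤ key z))) := by
  cases xs with
  | nil => rfl
  | cons x t =>
    unfold PySem.List.max?
    rw [List.foldl_cons]
    exact (List.foldl_ext _ _ (some x) (fun a b _ => by cases a <;> rfl)).trans
      (pv_max?_go key t x)

def pvPsum (f : Int × Int → Int) (es : List (Int × Int)) (c : Int) : Int :=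
  ((es.filter (fun rx => rx.2 == c)).map f).sum

theorem pv_getD_fold (f : Int × Int → Int) : ∀ (es : List (Int × Int)) (d : PySem.Dict Int Int) (c : Int),
    (es.foldl (fun d rc => d.insert rc.2 (d.getD rc.2 0 + f rc)) d).getD c 0
      = d.getD c 0 + pvPsum f es c := by
  intro es
  induction es with
  | nil => intro d c; simp [pvPsum]
  | cons rc t ih =>
    intro d c
    rw [List.foldl_cons, ih]
    rw [PySem.Dict.getD_insert]
    unfold pvPsum
    rw [List.filter_cons]
    by_cases h : rc.2 = c
    · simp [h]; ring
    · have : (rc.2 == c) = false := by simp [h]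
      simp [this, Ne.symm h]

theorem pv_keys_insert (d : PySem.Dict Int Int) (c v : Int) :
    (d.insert c v).keys = if c ∈ d.keys then d.keys else d.keys ++ [c] := by
  unfold PySem.Dict.insert PySem.Dict.keys PySem.Dict.contains
  by_cases h : c ∈ d.items.map Prod.fst
  · have hc : (d.items.any fun p => p.1 == c) = true := by
      simp only [List.any_eq_true, beq_iff_eq]
      obtain ⟨p, hp, he⟩ := List.mem_map.mp h
      exact ⟨p, hp, he⟩
    simp only [hc, if_pos, h, if_true]
    simp only [List.map_map]
    apply List.map_congr_left
    intro p hp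
    by_cases hpc : p.1 = c <;> simp [hpc]
  · have hc : (d.items.any fun p => p.1 == c) = false := by
      simp only [List.any_eq_false, beq_iff_eq]
      intro p hp he
      exact h (List.mem_map.mpr ⟨p, hp, he⟩)
    simp [hc, h]

theorem pv_mem_keys_fold (f : Int × Int → Int) : ∀ (es : List (Int × Int)) (d : PySem.Dict Int Int) (c : Int),
    (c ∈ (es.foldl (fun d rc => d.insert rc.2 (d.getD rc.2 0 + f rc)) d).keys
      ↔ c ∈ d.keys ∨ c ∈ es.map Prod.snd) := by
  intro es
  induction es with
  | nil => intro d c; simp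
  | cons rc t ih =>
    intro d c
    rw [List.foldl_cons, ih]
    rw [pv_keys_insert]
    by_cases h : rc.2 ∈ d.keys <;> simp [h]
    · constructor
      · tauto
      · rintro (hc | hc | hc)
        · tauto
        · exact Or.inl (hc ▸ h)
        · tauto
    · tauto

theorem pv_nodup_keys_fold (f : Int × Int → Int) : ∀ (es : List (Int × Int)) (d : PySem.Dict Int Int),
    d.keys.Nodup → (es.foldl (fun d rc => d.insert rc.2 (d.getD rc.2 0 + f rc)) d).keys.Nodup := by
  intro es
  induction es with
  | nil => intro d h; exact h
  | cons rc t ih =>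
    intro d h
    rw [List.foldl_cons]
    apply ih
    rw [pv_keys_insert]
    by_cases hk : rc.2 ∈ d.keys
    · simpa [hk] using h
    · simp [hk, List.nodup_append, h]
      exact fun a ha he => hk (he ▸ ha)

theorem pv_find?_assoc (c v : Int) : ∀ (l : List (Int × Int)),
    (l.map Prod.fst).Nodup → (c, v) ∈ l → l.find? (fun p => p.1 == c) = some (c, v) := by
  intro l
  induction l with
  | nil => intro _ h; cases h
  | cons p t ih =>
    intro hn h
    rw [List.map_cons, List.nodup_cons] at hn
    rw [List.find?_cons]
    rcases List.mem_cons.mp h with h1 | h2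
    · simp [← h1]
    · have hp : (p.1 == c) = false := by
        simp only [beq_eq_false_iff_ne, ne_eq]
        intro he
        exact hn.1 (he ▸ List.mem_map.mpr ⟨(c, v), h2, rfl⟩)
      simp only [hp]
      exact ih hn.2 h2

theorem pv_get?_of_mem_items (d : PySem.Dict Int Int) (c v : Int)
    (hn : d.keys.Nodup) (h : (c, v) ∈ d.items) : d.get? c = some v := by
  unfold PySem.Dict.get?
  rw [pv_find?_assoc c v d.items hn h]
  rfl

theorem pv_mem_keys_get? (d : PySem.Dict Int Int) (c : Int) (h : c ∈ d.keys) :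
    (c, d.getD c 0) ∈ d.items := by
  unfold PySem.Dict.keys at h
  obtain ⟨p, hp, hpc⟩ := List.mem_map.mp h
  have hs : ∃ q, d.items.find? (fun p => p.1 == c) = some q := by
    rw [← Option.isSome_iff_exists]
    rw [List.find?_isSome]
    exact ⟨p, hp, by simp [hpc]⟩
  obtain ⟨q, hq⟩ := hs
  have hq1 := List.find?_some hq
  rw [beq_iff_eq] at hq1
  have hqm : q ∈ d.items := List.mem_of_find?_eq_some hq
  have : d.getD c 0 = q.2 := by
    unfold PySem.Dict.getD PySem.Dict.get?
    rw [hq]; rfl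
  rw [this]
  rwa [← hq1]

theorem pv_exists_dominator (key : Int → Int) : ∀ (xs : List Int), xs ≠ [] →
    ∃ z ∈ xs, ∀ y ∈ xs, key y ≤ key z := by
  intro xs
  induction xs with
  | nil => intro h; exact absurd rfl h
  | cons x t ih =>
    intro _
    cases t with
    | nil => exact ⟨x, by simp⟩
    | cons a s =>
      obtain ⟨z, hz, hd⟩ := ih (by simp)
      by_cases h : key z < key x
      · refine ⟨x, List.mem_cons_self, ?_⟩
        intro y hy
        rcases List.mem_cons.mp hy with h1 | h2
        · exact le_of_eq (by rw [h1])
        · exact le_trans (hd y h2) (le_of_lt h)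
      · refine ⟨z, List.mem_cons_of_mem _ hz, ?_⟩
        intro y hy
        rcases List.mem_cons.mp hy with h1 | h2
        · rw [h1]; omega
        · exact hd y h2

theorem pv_max?_isSome (key : Int → Int) (xs : List Int) (h : xs ≠ []) :
    ∃ m, PySem.List.max? xs key = some m := by
  obtain ⟨z, hz, hd⟩ := pv_exists_dominator key xs h
  rw [pv_max?_eq_find?, ← Option.isSome_iff_exists, List.find?_isSome]
  exact ⟨z, hz, by simp only [List.all_eq_true, decide_eq_true_eq]; exact hd⟩

-- A's score dictionary and tie list, named so the proofs can speak about them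
def pvD (labels : List Int) : PySem.Dict Int Int :=
  (PySem.List.enumerate labels).foldl
    (fun d rc => d.insert rc.2 (d.getD rc.2 0 + ((labels.length : Int) - 1 - rc.1)))
    (PySem.Dict.mk [])

def pvTied (labels : List Int) (best : Int) : List Int :=
  ((pvD labels).items.filter (fun p => p.2 == best)).map Prod.fst

theorem pv_main (labels : List Int) (hpre : labels ≠ []) :
    vote_borda_py labels = vote_borda_py_alt labels := by
  have hf : ∀ c, (pvD labels).getD c 0 = pvScore labels c := by
    intro c
    have h := pv_getD_fold (fun rc => (labels.length : Int) - 1 - rc.1)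
      (PySem.List.enumerate labels) (PySem.Dict.mk []) c
    simpa [pvD, pvScore, pvPsum, PySem.Dict.getD, PySem.Dict.get?] using h
  have hkeys : ∀ c, c ∈ (pvD labels).keys ↔ c ∈ labels := by
    intro c
    have h := pv_mem_keys_fold (fun rc => (labels.length : Int) - 1 - rc.1)
      (PySem.List.enumerate labels) (PySem.Dict.mk []) c
    rw [PySem.List.map_snd_enumerate] at h
    simpa [pvD, PySem.Dict.keys] using h
  have hnd : (pvD labels).keys.Nodup := by
    apply pv_nodup_keys_fold
    simp [PySem.Dict.keys]
  obtain ⟨x0, hx0⟩ := List.exists_mem_of_ne_nil _ hpre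
  have hx0k : x0 ∈ (pvD labels).keys := (hkeys x0).mpr hx0
  have hvne : (pvD labels).values ≠ [] := by
    intro hv
    have hit : (pvD labels).items = [] := by
      unfold PySem.Dict.values at hv
      exact List.map_eq_nil_iff.mp hv
    unfold PySem.Dict.keys at hx0k
    rw [hit] at hx0k
    cases hx0k
  obtain ⟨best, hbest⟩ := pv_max?_isSome id _ hvne
  have hfind := hbest
  rw [pv_max?_eq_find? id] at hfind
  have hub : ∀ v ∈ (pvD labels).values, v ≤ best := by
    have hp := List.find?_some hfind
    simp only [List.all_eq_true, decide_eq_true_eq, id_eq] at hp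
    exact hp
  have hubS : ∀ y ∈ labels, pvScore labels y ≤ best := by
    intro y hy
    have hmemit := pv_mem_keys_get? _ _ ((hkeys y).mpr hy)
    have hv : (pvD labels).getD y 0 ∈ (pvD labels).values := by
      unfold PySem.Dict.values
      exact List.mem_map.mpr ⟨(y, (pvD labels).getD y 0), hmemit, rfl⟩
    rw [hf y] at hv
    exact hub _ hv
  have hatt : ∃ c0 ∈ labels, pvScore labels c0 = best := by
    have hmem := List.mem_of_find?_eq_some hfind
    unfold PySem.Dict.values at hmem
    obtain ⟨p, hp, hp2⟩ := List.mem_map.mp hmem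
    have hkey : p.1 ∈ (pvD labels).keys := by
      unfold PySem.Dict.keys
      exact List.mem_map.mpr ⟨p, hp, rfl⟩
    have hget : (pvD labels).get? p.1 = some p.2 := pv_get?_of_mem_items _ _ _ hnd hp
    refine ⟨p.1, (hkeys _).mp hkey, ?_⟩
    rw [← hf p.1]
    unfold PySem.Dict.getD
    rw [hget, Option.getD_some, hp2]
  have htied : ∀ x, x ∈ pvTied labels best ↔ x ∈ labels ∧ pvScore labels x = best := by
    intro x
    constructor
    · intro hx
      unfold pvTied at hx
      obtain ⟨p, hpf, hpx⟩ := List.mem_map.mp hx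
      obtain ⟨hp, hpb⟩ := List.mem_filter.mp hpf
      rw [beq_iff_eq] at hpb
      have hkey : p.1 ∈ (pvD labels).keys := by
        unfold PySem.Dict.keys
        exact List.mem_map.mpr ⟨p, hp, rfl⟩
      have hget : (pvD labels).get? p.1 = some p.2 := pv_get?_of_mem_items _ _ _ hnd hp
      refine ⟨hpx ▸ (hkeys _).mp hkey, ?_⟩
      rw [← hpx, ← hf p.1]
      unfold PySem.Dict.getD
      rw [hget, Option.getD_some, hpb]
    · rintro ⟨hx, hsx⟩
      have hmemit := pv_mem_keys_get? _ _ ((hkeys x).mpr hx)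
      unfold pvTied
      refine List.mem_map.mpr ⟨(x, (pvD labels).getD x 0), List.mem_filter.mpr ⟨hmemit, ?_⟩, rfl⟩
      rw [beq_iff_eq, hf x, hsx]
  obtain ⟨c0, hc0, hc0b⟩ := hatt
  have hPc0 : (labels.all fun y => decide (pvScore labels y ≤ pvScore labels c0)) = true := by
    simp only [List.all_eq_true, decide_eq_true_eq]
    intro y hy
    rw [hc0b]
    exact hubS y hy
  obtain ⟨w, hw⟩ : ∃ w, labels.find?
      (fun z => labels.all fun y => decide (pvScore labels y ≤ pvScore labels z)) = some w := by
    rw [← Option.isSome_iff_exists, List.find?_isSome]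
    exact ⟨c0, hc0, hPc0⟩
  have hwmem : w ∈ labels := List.mem_of_find?_eq_some hw
  have hwdom := List.find?_some hw
  simp only [List.all_eq_true, decide_eq_true_eq] at hwdom
  have hwb : pvScore labels w = best :=
    le_antisymm (hubS w hwmem) (hc0b ▸ hwdom c0 hc0)
  have hB : vote_borda_py_alt labels = w := by
    unfold vote_borda_py_alt
    rw [pv_max?_eq_find?, hw]
    rfl
  rw [hB]
  have hfold : (PySem.List.enumerate labels).foldl
      (fun d rc => d.insert rc.2 (d.getD rc.2 0 + ((labels.length : Int) - 1 - rc.1)))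
      (PySem.Dict.mk []) = pvD labels := rfl
  simp only [vote_borda_py]
  rw [hfold, hbest]
  have htfold : ((pvD labels).items.filter (fun p => p.2 == best)).map Prod.fst
      = pvTied labels best := rfl
  simp only [htfold]
  by_cases hlen : (pvTied labels best).length = 1
  · rw [if_pos hlen]
    obtain ⟨c1, hc1⟩ := List.length_eq_one_iff.mp hlen
    have hwmem' : w ∈ pvTied labels best := (htied w).mpr ⟨hwmem, hwb⟩
    rw [hc1] at hwmem' ⊢
    simp only [List.mem_singleton] at hwmem'
    simp [hwmem']
  · rw [if_neg hlen]
    have hpt : ∀ c ∈ labels, ((pvTied labels best).contains c)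
        = (labels.all fun y => decide (pvScore labels y ≤ pvScore labels c)) := by
      intro c hc
      by_cases hcb : pvScore labels c = best
      · have h1 : ((pvTied labels best).contains c) = true := by
          rw [List.contains_iff_mem]
          exact (htied c).mpr ⟨hc, hcb⟩
        have h2 : (labels.all fun y => decide (pvScore labels y ≤ pvScore labels c)) = true := by
          simp only [List.all_eq_true, decide_eq_true_eq]
          intro y hy
          rw [hcb]
          exact hubS y hy
        rw [h1, h2]
      · have h1 : ((pvTied labels best).contains c) = false := by
          rw [Bool.eq_false_iff, ne_eq, List.contains_iff_mem]
          intro hmem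
          exact hcb ((htied c).mp hmem).2
        have h2 : (labels.all fun y => decide (pvScore labels y ≤ pvScore labels c)) = false := by
          rw [Bool.eq_false_iff, ne_eq, List.all_eq_true]
          intro hall
          have := hall c0 hc0
          simp only [decide_eq_true_eq] at this
          exact hcb (le_antisymm (hubS c hc) (hc0b ▸ this))
        rw [h1, h2]
    have hcg : labels.find? (fun c => (pvTied labels best).contains c) = some w := by
      rw [pv_find?_congr_mem labels hpt]
      exact hw
    rw [hcg]

-- ===== VERDICT (by name: the statement is the Claim_ definition above) =====
theorem vote_borda_py_spec : Claim_equal_vote_borda_py := by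
  intro labels _ hpre
  unfold Spec_vote_borda_py
  exact pv_main labels hpre
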